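-- pv_equiv track=rewrite | github.com/Rajas49/chatbot | utils/intent_detector.py | get_suggested_followups
-- ===== SOURCE A (Python) =====
-- def get_suggested_followups(detected_intents, conversation_context=None):
--     """Suggest follow-up questions based on detected intents"""
--     suggestions = []
--
--     for category in detected_intents.get('categories', []):
--         if 'service' in category.lower():
--             suggestions.extend([
--                 "Would you like to see our case studies?",
--                 "What's your timeline for implementation?",
--                 "Can I connect you with our solutions expert?"
--             ])
--         elif 'career' in category.lower():
--             suggestions.extend([
--                 "What type of role are you interested in?",
--                 "Would you like to know about our company culture?",
--                 "Can I help you find current job openings?"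
--             ])
--         elif 'company' in category.lower() or 'about' in category.lower():
--             suggestions.extend([
--                 "Would you like to know about our leadership team?",
--                 "Are you interested in our company values?",
--                 "Can I tell you about our recent achievements?"
--             ])
--
--     # Remove duplicates and limit suggestions
--     unique_suggestions = list(dict.fromkeys(suggestions))[:3]
--     return unique_suggestions
-- ===== SOURCE B (Python) =====
-- _RULES = [
--     (("service",), ["Would you like to see our case studies?",
--                     "What's your timeline for implementation?",
--                     "Can I connect you with our solutions expert?"]),
--     (("career",), ["What type of role are you interested in?",
--                    "Would you like to know about our company culture?",
--                    "Can I help you find current job openings?"]),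
--     (("company", "about"), ["Would you like to know about our leadership team?",
--                             "Are you interested in our company values?",
--                             "Can I tell you about our recent achievements?"]),
-- ]
--
--
-- def get_suggested_followups(detected_intents, conversation_context=None):
--     # First matching category fully determines the answer: it contributes three
--     # distinct suggestions, so A's dedup + [:3] keeps exactly those three.
--     for category in detected_intents.get('categories', []):
--         lowered = category.lower()
--         for keywords, followups in _RULES:
--             if any(k in lowered for k in keywords):
--                 return list(followups)
--     return []
-- ===== Notes on version B (the rewrite author's own statement) =====
-- stated objective: simpler
-- what changed: B replaces A's accumulate-all-categories-then-dedup-and-truncate pipeline with a rule table scanned for the first matching category, returning that rule's three suggestions directly (each rule contributes three distinct suggestions, so A's dedup+[:3] always yields exactly the first match's list).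
import Mathlib
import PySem

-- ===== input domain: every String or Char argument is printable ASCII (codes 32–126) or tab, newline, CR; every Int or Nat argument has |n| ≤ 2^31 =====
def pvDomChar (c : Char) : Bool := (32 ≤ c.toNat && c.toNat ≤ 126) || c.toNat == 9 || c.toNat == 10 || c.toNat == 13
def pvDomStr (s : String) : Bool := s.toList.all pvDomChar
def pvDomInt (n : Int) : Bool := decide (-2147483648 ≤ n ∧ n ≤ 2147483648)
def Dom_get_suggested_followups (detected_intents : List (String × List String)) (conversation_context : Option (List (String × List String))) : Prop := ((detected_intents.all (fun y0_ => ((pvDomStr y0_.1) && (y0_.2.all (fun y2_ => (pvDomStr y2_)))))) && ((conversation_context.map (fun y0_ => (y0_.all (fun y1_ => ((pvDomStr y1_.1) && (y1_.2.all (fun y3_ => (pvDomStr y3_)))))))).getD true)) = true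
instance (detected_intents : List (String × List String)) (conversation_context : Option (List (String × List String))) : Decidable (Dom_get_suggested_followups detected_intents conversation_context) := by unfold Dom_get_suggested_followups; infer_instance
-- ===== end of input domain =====

-- B replaces A's accumulate/dedup/truncate pipeline with a first-matching-rule table lookup; objective: simpler.


-- ===== PORT A =====
-- Literal transliteration: fold over categories extending the suggestions list
-- branch by branch, then list(dict.fromkeys(...))[:3] = PySem.List.dedup + take 3.
def get_suggested_followups (detected_intents : List (String × List String)) (conversation_context : Option (List (String × List String))) : List String :=
  let suggestions : List String :=
    (PySem.Dict.getD ⟨detected_intents⟩ "categories" []).foldl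
      (fun suggestions category =>
        if PySem.Str.isIn "service" (PySem.Str.lower category) then
          suggestions ++ ["Would you like to see our case studies?",
                          "What's your timeline for implementation?",
                          "Can I connect you with our solutions expert?"]
        else if PySem.Str.isIn "career" (PySem.Str.lower category) then
          suggestions ++ ["What type of role are you interested in?",
                          "Would you like to know about our company culture?",
                          "Can I help you find current job openings?"]
        else if PySem.Str.isIn "company" (PySem.Str.lower category) || PySem.Str.isIn "about" (PySem.Str.lower category) then
          suggestions ++ ["Would you like to know about our leadership team?",
                          "Are you interested in our company values?",
                          "Can I tell you about our recent achievements?"]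
        else suggestions)
      []
  (PySem.List.dedup suggestions).take 3

-- ===== PORT B =====
-- The rule table _RULES of Source B.
def pvRules : List (List String × List String) :=
  [ (["service"], ["Would you like to see our case studies?",
                   "What's your timeline for implementation?",
                   "Can I connect you with our solutions expert?"]),
    (["career"], ["What type of role are you interested in?",
                  "Would you like to know about our company culture?",
                  "Can I help you find current job openings?"]),
    (["company", "about"], ["Would you like to know about our leadership team?",
                            "Are you interested in our company values?",
                            "Can I tell you about our recent achievements?"]) ]

-- the outer for-loop of Source B: first category matching any rule wins
def pvFirstMatch : List String → List String
  | [] => []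
  | category :: rest =>
    match pvRules.find? (fun r => r.1.any (fun k => PySem.Str.isIn k (PySem.Str.lower category))) with
    | some r => r.2
    | none => pvFirstMatch rest

def get_suggested_followups_alt (detected_intents : List (String × List String)) (conversation_context : Option (List (String × List String))) : List String :=
  pvFirstMatch (PySem.Dict.getD ⟨detected_intents⟩ "categories" [])

-- ===== PRECONDITION & SPEC =====
def Spec_get_suggested_followups (detected_intents : List (String × List String)) (conversation_context : Option (List (String × List String))) (out : List String) : Prop := out = get_suggested_followups_alt detected_intents conversation_context
instance (detected_intents : List (String × List String)) (conversation_context : Option (List (String × List String))) (out : List String) : Decidable (Spec_get_suggested_followups detected_intents conversation_context out) := by unfold Spec_get_suggested_followups; infer_instance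

-- ===== CLAIM (what is proved, stated in full; the proofs are below) =====
def Claim_equal_get_suggested_followups : Prop := ∀ (detected_intents : List (String × List String)) (conversation_context : Option (List (String × List String))), Dom_get_suggested_followups detected_intents conversation_context → Spec_get_suggested_followups detected_intents conversation_context (get_suggested_followups detected_intents conversation_context)

-- ===== LEMMAS AND PROOFS =====

-- per-category contribution of A's elif chain
def pvContrib (category : String) : List String :=
  if PySem.Str.isIn "service" (PySem.Str.lower category) then
    ["Would you like to see our case studies?",
     "What's your timeline for implementation?",
     "Can I connect you with our solutions expert?"]
  else if PySem.Str.isIn "career" (PySem.Str.lower category) then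
    ["What type of role are you interested in?",
     "Would you like to know about our company culture?",
     "Can I help you find current job openings?"]
  else if PySem.Str.isIn "company" (PySem.Str.lower category) || PySem.Str.isIn "about" (PySem.Str.lower category) then
    ["Would you like to know about our leadership team?",
     "Are you interested in our company values?",
     "Can I tell you about our recent achievements?"]
  else []

lemma pvStep_eq (acc : List String) (c : String) :
    (if PySem.Str.isIn "service" (PySem.Str.lower c) then
        acc ++ ["Would you like to see our case studies?",
                "What's your timeline for implementation?",
                "Can I connect you with our solutions expert?"]
      else if PySem.Str.isIn "career" (PySem.Str.lower c) then
        acc ++ ["What type of role are you interested in?",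
                "Would you like to know about our company culture?",
                "Can I help you find current job openings?"]
      else if PySem.Str.isIn "company" (PySem.Str.lower c) || PySem.Str.isIn "about" (PySem.Str.lower c) then
        acc ++ ["Would you like to know about our leadership team?",
                "Are you interested in our company values?",
                "Can I tell you about our recent achievements?"]
      else acc) = acc ++ pvContrib c := by
  unfold pvContrib; split_ifs <;> simp

-- Set.add only ever appends, so the accumulator is a prefix of the final fold
lemma pvFoldl_add_prefix (rest : List String) : ∀ acc : List String,
    acc <+: List.foldl PySem.Set.add acc rest := by
  induction rest with
  | nil => intro acc; simp
  | cons x xs ih =>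
    intro acc
    refine List.IsPrefix.trans ?_ (ih (PySem.Set.add acc x))
    simp [PySem.Set.add]; split_ifs <;> simp

-- three distinct strings at the front survive dedup and take 3
lemma pvDedup_take3 (s1 s2 s3 : String) (rest : List String)
    (h12 : s1 ≠ s2) (h13 : s1 ≠ s3) (h23 : s2 ≠ s3) :
    (PySem.List.dedup (s1 :: s2 :: s3 :: rest)).take 3 = [s1, s2, s3] := by
  have hadd : PySem.Set.add (PySem.Set.add (PySem.Set.add PySem.Set.empty s1) s2) s3 = [s1, s2, s3] := by
    simp [PySem.Set.add, PySem.Set.empty, List.contains_eq_mem, h12.symm, h13.symm, h23.symm]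
  have hded : PySem.List.dedup (s1 :: s2 :: s3 :: rest)
      = List.foldl PySem.Set.add [s1, s2, s3] rest := by
    show List.foldl PySem.Set.add PySem.Set.empty (s1 :: s2 :: s3 :: rest)
        = List.foldl PySem.Set.add [s1, s2, s3] rest
    simp only [List.foldl_cons]
    rw [hadd]
  obtain ⟨t, ht⟩ := pvFoldl_add_prefix rest [s1, s2, s3]
  rw [hded, ← ht]
  simp

lemma pvCore (cats : List String) :
    (PySem.List.dedup (cats.flatMap pvContrib)).take 3 = pvFirstMatch cats := by
  induction cats with
  | nil => simp [pvFirstMatch, PySem.List.dedup, PySem.Set.ofList, PySem.Set.empty]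
  | cons c cs ih =>
    by_cases hs : PySem.Chars.isIn ['s','e','r','v','i','c','e'] (PySem.Chars.lower c.toList) = true
    · have hcon : pvContrib c = ["Would you like to see our case studies?",
          "What's your timeline for implementation?",
          "Can I connect you with our solutions expert?"] := by
        simp [pvContrib, hs]
      have hfm : pvFirstMatch (c :: cs) = ["Would you like to see our case studies?",
          "What's your timeline for implementation?",
          "Can I connect you with our solutions expert?"] := by
        simp [pvFirstMatch, pvRules, hs]
      rw [List.flatMap_cons, hcon, hfm, List.cons_append, List.cons_append, List.cons_append,
        List.nil_append]
      exact pvDedup_take3 _ _ _ _ (by decide) (by decide) (by decide)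
    · rw [Bool.not_eq_true] at hs
      by_cases hc : PySem.Chars.isIn ['c','a','r','e','e','r'] (PySem.Chars.lower c.toList) = true
      · have hcon : pvContrib c = ["What type of role are you interested in?",
            "Would you like to know about our company culture?",
            "Can I help you find current job openings?"] := by
          simp [pvContrib, hs, hc]
        have hfm : pvFirstMatch (c :: cs) = ["What type of role are you interested in?",
            "Would you like to know about our company culture?",
            "Can I help you find current job openings?"] := by
          simp [pvFirstMatch, pvRules, List.find?, hs, hc]
        rw [List.flatMap_cons, hcon, hfm, List.cons_append, List.cons_append, List.cons_append,
          List.nil_append]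
        exact pvDedup_take3 _ _ _ _ (by decide) (by decide) (by decide)
      · rw [Bool.not_eq_true] at hc
        by_cases hco : PySem.Chars.isIn ['c','o','m','p','a','n','y'] (PySem.Chars.lower c.toList) = true
        · have hcon : pvContrib c = ["Would you like to know about our leadership team?",
              "Are you interested in our company values?",
              "Can I tell you about our recent achievements?"] := by
            simp [pvContrib, hs, hc, hco]
          have hfm : pvFirstMatch (c :: cs) = ["Would you like to know about our leadership team?",
              "Are you interested in our company values?",
              "Can I tell you about our recent achievements?"] := by
            simp [pvFirstMatch, pvRules, List.find?, hs, hc, hco]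
          rw [List.flatMap_cons, hcon, hfm, List.cons_append, List.cons_append, List.cons_append,
            List.nil_append]
          exact pvDedup_take3 _ _ _ _ (by decide) (by decide) (by decide)
        · rw [Bool.not_eq_true] at hco
          by_cases hab : PySem.Chars.isIn ['a','b','o','u','t'] (PySem.Chars.lower c.toList) = true
          · have hcon : pvContrib c = ["Would you like to know about our leadership team?",
                "Are you interested in our company values?",
                "Can I tell you about our recent achievements?"] := by
              simp [pvContrib, hs, hc, hco, hab]
            have hfm : pvFirstMatch (c :: cs) = ["Would you like to know about our leadership team?",
                "Are you interested in our company values?",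
                "Can I tell you about our recent achievements?"] := by
              simp [pvFirstMatch, pvRules, List.find?, hs, hc, hco, hab]
            rw [List.flatMap_cons, hcon, hfm, List.cons_append, List.cons_append, List.cons_append,
              List.nil_append]
            exact pvDedup_take3 _ _ _ _ (by decide) (by decide) (by decide)
          · rw [Bool.not_eq_true] at hab
            have hcon : pvContrib c = [] := by
              simp [pvContrib, hs, hc, hco, hab]
            have hfm : pvFirstMatch (c :: cs) = pvFirstMatch cs := by
              simp [pvFirstMatch, pvRules, List.find?, hs, hc, hco, hab]
            rw [List.flatMap_cons, hcon, List.nil_append, hfm]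
            exact ih

-- ===== VERDICT (by name: the statement is the Claim_ definition above) =====
theorem get_suggested_followups_spec : Claim_equal_get_suggested_followups := by
  intro di cc _
  show get_suggested_followups di cc = get_suggested_followups_alt di cc
  unfold get_suggested_followups get_suggested_followups_alt
  have hstep : ∀ cats : List String,
      cats.foldl (fun acc c =>
        if PySem.Str.isIn "service" (PySem.Str.lower c) then
          acc ++ ["Would you like to see our case studies?",
                  "What's your timeline for implementation?",
                  "Can I connect you with our solutions expert?"]
        else if PySem.Str.isIn "career" (PySem.Str.lower c) then
          acc ++ ["What type of role are you interested in?",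
                  "Would you like to know about our company culture?",
                  "Can I help you find current job openings?"]
        else if PySem.Str.isIn "company" (PySem.Str.lower c) || PySem.Str.isIn "about" (PySem.Str.lower c) then
          acc ++ ["Would you like to know about our leadership team?",
                  "Are you interested in our company values?",
                  "Can I tell you about our recent achievements?"]
        else acc) [] = cats.flatMap pvContrib := by
    intro cats
    have := PySem.List.foldl_append_eq_flatMap pvContrib cats []
    simp only [List.nil_append] at this
    rw [← this]
    congr 1; funext acc c; exact pvStep_eq acc c
  rw [hstep]
  exact pvCore _
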